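-- pv_equiv track=rewrite | github.com/ak-maker/lnm | automation_for_markdown/automation/api_markdown_divider_for_parallel_script.py | extract_headings_and_intro
-- ===== SOURCE A (Python) =====
-- def extract_headings_and_intro(lines):
--     # pattern = re.compile('[^-#=/*\[.\]:,&\'()_a-zA-Z0-9"\n ]')
--     # pattern = re.compile(r'\[source\]|[^-#=/*\[.\]:,&\'()_a-zA-Z0-9"\n ]')
--     headings = []
--     intro_content = []
--     intro_started = False
--     intro_end_found = False
--
--     for line in lines:
--         if not intro_started and line.startswith("# "):
--             intro_started = True
--
--         if intro_started and not intro_end_found and line.startswith("## "):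
--             intro_end_found = True
--
--         if intro_started and not intro_end_found:
--             intro_content.append(line)
--         elif line.startswith("## ") or line.startswith("### ") or line.startswith("#### "):
--             # cleaned_line = pattern.sub('', line.strip())
--             headings.append(line + '\n')
--
--     return headings, intro_content
-- ===== SOURCE B (Python) =====
-- def extract_headings_and_intro(lines):
--     lines = list(lines)
--     start = next((i for i, l in enumerate(lines) if l.startswith("# ")), None)
--     if start is None:
--         intro_content = []
--         outside = lines
--     else:
--         end = next((j for j in range(start, len(lines)) if lines[j].startswith("## ")), len(lines))
--         intro_content = lines[start:end]
--         outside = lines[:start] + lines[end:]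
--     headings = [l + '\n' for l in outside
--                 if l.startswith("## ") or l.startswith("### ") or l.startswith("#### ")]
--     return headings, intro_content
-- ===== Notes on version B (the rewrite author's own statement) =====
-- stated objective: simpler
-- what changed: Replaces the stateful single loop with two boolean flags by a direct decomposition: locate the intro region as slice boundaries (first '# ' line to the first '## ' line at or after it), take the intro as a slice, and collect headings in one comprehension over the lines outside that region.
import Mathlib
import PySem

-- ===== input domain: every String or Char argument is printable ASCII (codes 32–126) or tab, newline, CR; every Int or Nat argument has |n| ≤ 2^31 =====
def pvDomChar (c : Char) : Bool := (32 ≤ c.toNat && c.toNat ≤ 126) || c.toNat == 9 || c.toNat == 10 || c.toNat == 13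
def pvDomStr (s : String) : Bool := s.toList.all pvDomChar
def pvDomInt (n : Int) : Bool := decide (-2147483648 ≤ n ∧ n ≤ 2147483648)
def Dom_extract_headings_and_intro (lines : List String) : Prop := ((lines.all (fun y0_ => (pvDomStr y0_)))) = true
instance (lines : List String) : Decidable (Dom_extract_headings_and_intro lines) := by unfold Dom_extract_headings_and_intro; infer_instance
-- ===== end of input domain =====

-- B replaces A's stateful flag loop by a decomposition into slice boundaries (intro region) plus
-- one comprehension over the lines outside it; same cost, simpler structure.

-- ===== PORT A =====
-- loop body of A's for-loop; state = (headings, intro_content, intro_started, intro_end_found)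
def pvStepA (acc : List String × List String × Bool × Bool) (line : String) :
    List String × List String × Bool × Bool :=
  match acc with
  | (headings, intro_content, intro_started, intro_end_found) =>
    let intro_started := if !intro_started && PySem.Str.startswith line "# " then true else intro_started
    let intro_end_found := if intro_started && !intro_end_found && PySem.Str.startswith line "## " then true else intro_end_found
    if intro_started && !intro_end_found then
      (headings, intro_content ++ [line], intro_started, intro_end_found)
    else if PySem.Str.startswith line "## " || PySem.Str.startswith line "### " || PySem.Str.startswith line "#### " then
      (headings ++ [line ++ "\n"], intro_content, intro_started, intro_end_found)
    else
      (headings, intro_content, intro_started, intro_end_found)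

def extract_headings_and_intro (lines : List String) : List String × List String :=
  let r := lines.foldl pvStepA ([], [], false, false)
  (r.1, r.2.1)

-- ===== PORT B =====
-- Source B's slices lines[start:end], lines[:start], lines[end:] have 0 ≤ start ≤ end ≤ len, so take/drop is exact
def extract_headings_and_intro_alt (lines : List String) : List String × List String :=
  let headingsOf := fun (ls : List String) =>
    (ls.filter (fun l => PySem.Str.startswith l "## " || PySem.Str.startswith l "### " || PySem.Str.startswith l "#### ")).map (fun l => l ++ "\n")
  match lines.findIdx? (fun l => PySem.Str.startswith l "# ") with
  | none => (headingsOf lines, [])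
  | some start =>
    let e := match (lines.drop start).findIdx? (fun l => PySem.Str.startswith l "## ") with
             | some k => start + k
             | none => lines.length
    (headingsOf (lines.take start ++ lines.drop e), (lines.drop start).take (e - start))

-- ===== PRECONDITION & SPEC =====
def Spec_extract_headings_and_intro (lines : List String) (out : List String × List String) : Prop := out = extract_headings_and_intro_alt lines
instance (lines : List String) (out : List String × List String) : Decidable (Spec_extract_headings_and_intro lines out) := by unfold Spec_extract_headings_and_intro; infer_instance

-- ===== CLAIM (what is proved, stated in full; the proofs are below) =====
def Claim_equal_extract_headings_and_intro : Prop := ∀ (lines : List String), Dom_extract_headings_and_intro lines → Spec_extract_headings_and_intro lines (extract_headings_and_intro lines)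

-- ===== LEMMAS AND PROOFS =====

-- heading predicate and the heading list of a block of lines
def pvHp (l : String) : Bool :=
  PySem.Str.startswith l "## " || PySem.Str.startswith l "### " || PySem.Str.startswith l "#### "

def pvHd (ls : List String) : List String := (ls.filter pvHp).map (fun l => l ++ "\n")

lemma pvHd_cons (l : String) (ls : List String) :
    pvHd (l :: ls) = (if pvHp l then [l ++ "\n"] else []) ++ pvHd ls := by
  by_cases h : pvHp l = true <;> simp [pvHd, h]

-- a line starting with "# " does not start with "## "
lemma pv_disj (l : String) (h : PySem.Str.startswith l "# " = true) :
    PySem.Str.startswith l "## " = false := by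
  by_contra hc
  rw [Bool.not_eq_false] at hc
  rw [PySem.Str.startswith_eq, PySem.Chars.startswith_iff] at h hc
  have e1 : "# ".toList = ['#', ' '] := rfl
  have e2 : "## ".toList = ['#', '#', ' '] := rfl
  rw [e1] at h; rw [e2] at hc
  obtain ⟨t, ht⟩ := h
  obtain ⟨u, hu⟩ := hc
  rw [← ht] at hu
  simp at hu

-- a "## " line is a heading line
lemma pv_hp_of_h2 (l : String) (h : PySem.Str.startswith l "## " = true) : pvHp l = true := by
  simp only [pvHp, h, Bool.true_or]

-- how A's loop body acts in each phase
lemma pv_step22 (hs is : List String) (l : String) :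
    pvStepA (hs, is, true, true) l = (hs ++ (if pvHp l then [l ++ "\n"] else []), is, true, true) := by
  simp only [pvStepA, pvHp]
  split_ifs <;> simp_all

lemma pv_step10 (hs is : List String) (l : String) :
    pvStepA (hs, is, true, false) l =
      if PySem.Str.startswith l "## " then (hs ++ [l ++ "\n"], is, true, true)
      else (hs, is ++ [l], true, false) := by
  simp only [pvStepA]
  split_ifs <;> simp_all

lemma pv_step00_no (hs is : List String) (l : String) (h : PySem.Str.startswith l "# " = false) :
    pvStepA (hs, is, false, false) l =
      (hs ++ (if pvHp l then [l ++ "\n"] else []), is, false, false) := by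
  simp only [pvStepA, pvHp, h]
  split_ifs <;> simp_all

lemma pv_step00_yes (hs is : List String) (l : String) (h : PySem.Str.startswith l "# " = true) :
    pvStepA (hs, is, false, false) l = (hs, is ++ [l], true, false) := by
  simp only [pvStepA, h, pv_disj l h]
  split_ifs <;> simp_all

-- phase 2: intro ended — only headings are collected
lemma pv_phase2 (L : List String) : ∀ (hs is : List String),
    L.foldl pvStepA (hs, is, true, true) = (hs ++ pvHd L, is, true, true) := by
  induction L with
  | nil => intro hs is; simp [pvHd]
  | cons l rest ih =>
    intro hs is
    rw [List.foldl_cons, pv_step22, ih, pvHd_cons, List.append_assoc]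

-- phase 1: intro started, not ended
lemma pv_phase1 (L : List String) : ∀ (hs is : List String),
    L.foldl pvStepA (hs, is, true, false) =
      match L.findIdx? (fun l => PySem.Str.startswith l "## ") with
      | none => (hs, is ++ L, true, false)
      | some k => (hs ++ pvHd (L.drop k), is ++ L.take k, true, true) := by
  induction L with
  | nil => intro hs is; simp
  | cons l rest ih =>
    intro hs is
    rw [List.foldl_cons, pv_step10, List.findIdx?_cons]
    by_cases h2 : PySem.Str.startswith l "## " = true
    · rw [if_pos h2, if_pos h2, pv_phase2]
      simp [pvHd_cons, pv_hp_of_h2 l h2]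
    · rw [if_neg h2, if_neg h2, ih]
      cases hf : rest.findIdx? (fun l => PySem.Str.startswith l "## ") with
      | none => simp
      | some k => simp

-- phase 0: before the intro
lemma pv_phase0 (L : List String) : ∀ (hs is : List String),
    L.foldl pvStepA (hs, is, false, false) =
      match L.findIdx? (fun l => PySem.Str.startswith l "# ") with
      | none => (hs ++ pvHd L, is, false, false)
      | some i =>
        match (L.drop i).findIdx? (fun l => PySem.Str.startswith l "## ") with
        | none => (hs ++ pvHd (L.take i), is ++ L.drop i, true, false)
        | some k => (hs ++ pvHd (L.take i) ++ pvHd (L.drop (i + k)), is ++ (L.drop i).take k, true, true) := by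
  induction L with
  | nil => intro hs is; simp [pvHd]
  | cons l rest ih =>
    intro hs is
    rw [List.foldl_cons, List.findIdx?_cons]
    by_cases h1 : PySem.Str.startswith l "# " = true
    · rw [pv_step00_yes hs is l h1, pv_phase1, if_pos h1]
      have h2 : PySem.Str.startswith l "## " = false := pv_disj l h1
      simp only [List.drop_zero, List.findIdx?_cons, h2, Bool.false_eq_true, if_false]
      cases hf : rest.findIdx? (fun l => PySem.Str.startswith l "## ") with
      | none => simp [pvHd]
      | some k => simp [pvHd]
    · rw [pv_step00_no hs is l (by simpa using h1), ih, if_neg h1]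
      cases hf : rest.findIdx? (fun l => PySem.Str.startswith l "# ") with
      | none => simp [pvHd_cons, List.append_assoc]
      | some i =>
        simp only [Option.map_some]
        have hd : (l :: rest).drop (i + 1) = rest.drop i := by simp
        have ht : (l :: rest).take (i + 1) = l :: rest.take i := by simp
        rw [hd, ht]
        cases hg : (rest.drop i).findIdx? (fun l => PySem.Str.startswith l "## ") with
        | none => simp [pvHd_cons, List.append_assoc]
        | some k =>
          simp [pvHd_cons, List.append_assoc, show i + 1 + k = (i + k) + 1 from by omega]

lemma pvHd_eq (ls : List String) :
    pvHd ls = (ls.filter (fun l => PySem.Str.startswith l "## " || PySem.Str.startswith l "### " || PySem.Str.startswith l "#### ")).map (fun l => l ++ "\n") := by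
  unfold pvHd
  have h : ls.filter pvHp = ls.filter (fun l => PySem.Str.startswith l "## " || PySem.Str.startswith l "### " || PySem.Str.startswith l "#### ") := by
    apply List.filter_congr
    intro x _
    simp [pvHp]
  rw [h]

-- ===== VERDICT (by name: the statement is the Claim_ definition above) =====
theorem extract_headings_and_intro_spec : Claim_equal_extract_headings_and_intro := by
  intro lines _
  unfold Spec_extract_headings_and_intro extract_headings_and_intro extract_headings_and_intro_alt
  rw [pv_phase0]
  cases h0 : lines.findIdx? (fun l => PySem.Str.startswith l "# ") with
  | none => dsimp only; simp only [pvHd_eq, List.nil_append]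
  | some i =>
    dsimp only
    cases h2 : (lines.drop i).findIdx? (fun l => PySem.Str.startswith l "## ") with
    | none =>
      dsimp only
      simp only [pvHd_eq, List.nil_append, List.drop_length, List.append_nil]
      rw [show lines.length - i = (lines.drop i).length by simp, List.take_length]
    | some k =>
      dsimp only
      simp only [pvHd_eq, List.nil_append, show i + k - i = k from by omega,
        List.filter_append, List.map_append]
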